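-- pv_equiv track=rewrite | github.com/Jared-02/Morpheus | backend/core/chapter_craft.py | build_outline_phase_hints
-- ===== SOURCE A (Python) =====
-- from typing import Any, Dict, Iterable, List, Optional, Set, TYPE_CHECKING
--
-- def build_outline_phase_hints(chapter_count: int, continuation_mode: bool) -> List[Dict[str, str]]:
--     total = max(1, int(chapter_count or 1))
--     hints: List[Dict[str, str]] = []
--
--     for idx in range(total):
--         position = (idx + 1) / total
--         if continuation_mode:
--             if position <= 0.3:
--                 phase = "起势递进"
--                 focus = "引入新异常并绑定角色目标"
--             elif position <= 0.7:
--                 phase = "代价扩张"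
--                 focus = "冲突升级且代价外溢，避免主线完结"
--             else:
--                 phase = "阶段收束"
--                 focus = "回收局部伏笔并留下更大钩子"
--         else:
--             if position <= 0.2:
--                 phase = "铺设与触发"
--                 focus = "建立核心问题与关键人物立场"
--             elif position <= 0.55:
--                 phase = "压力升级"
--                 focus = "连续决策导致局势恶化"
--             elif position <= 0.85:
--                 phase = "反转与逼近"
--                 focus = "揭露误导并逼近核心真相"
--             else:
--                 phase = "收束与续钩"
--                 focus = "兑现局部结果并留下后续驱动力"
--
--         hints.append(
--             {
--                 "chapter_index": str(idx + 1),
--                 "phase": phase,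
--                 "focus": focus,
--             }
--         )
--
--     return hints
-- ===== SOURCE B (Python) =====
-- def build_outline_phase_hints(chapter_count, continuation_mode):
--     # Band table: (threshold in twentieths, phase, focus). Instead of testing the
--     # position of every chapter against each threshold, compute the last chapter
--     # index of each band once (upper = t20*total//20, exact, since position<=t20/20
--     # iff 20*(idx+1) <= t20*total), preallocate the result and write each band's
--     # run of chapters with one slice assignment.
--     total = max(1, chapter_count)
--     if continuation_mode:
--         bands = [(6, "起势递进", "引入新异常并绑定角色目标"),
--                  (14, "代价扩张", "冲突升级且代价外溢，避免主线完结"),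
--                  (20, "阶段收束", "回收局部伏笔并留下更大钩子")]
--     else:
--         bands = [(4, "铺设与触发", "建立核心问题与关键人物立场"),
--                  (11, "压力升级", "连续决策导致局势恶化"),
--                  (17, "反转与逼近", "揭露误导并逼近核心真相"),
--                  (20, "收束与续钩", "兑现局部结果并留下后续驱动力")]
--     hints = [None] * total
--     prev = 0
--     for t20, phase, focus in bands:
--         upper = t20 * total // 20
--         hints[prev:upper] = [
--             {"chapter_index": str(i + 1), "phase": phase, "focus": focus}
--             for i in range(prev, upper)
--         ]
--         prev = upper
--     return hints
-- ===== Notes on version B (the rewrite author's own statement) =====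
-- stated objective: alternative
-- what changed: Replaces the per-chapter if/elif threshold cascade on a float position by a band table: each band's last chapter index is computed once with integer floor division, the result list is preallocated and each band's run of chapters is written with one slice assignment.
import Mathlib
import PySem

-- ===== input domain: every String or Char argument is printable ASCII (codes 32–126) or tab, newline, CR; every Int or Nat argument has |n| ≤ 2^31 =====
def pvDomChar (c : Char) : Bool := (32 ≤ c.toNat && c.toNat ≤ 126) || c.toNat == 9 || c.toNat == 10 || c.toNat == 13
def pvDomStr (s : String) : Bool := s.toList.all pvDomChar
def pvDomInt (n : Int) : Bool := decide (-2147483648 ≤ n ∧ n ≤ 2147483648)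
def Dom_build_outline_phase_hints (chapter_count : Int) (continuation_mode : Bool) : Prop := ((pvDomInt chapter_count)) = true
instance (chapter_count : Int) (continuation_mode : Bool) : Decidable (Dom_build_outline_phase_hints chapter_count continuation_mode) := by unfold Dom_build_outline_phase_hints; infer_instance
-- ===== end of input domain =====

-- B replaces the per-chapter threshold cascade by a band table whose chapter runs are
-- computed once with integer division and emitted directly (objective: alternative).

-- the dict literal both Pythons append per chapter
def pvRow (phase focus : String) (idx : Int) : List (String × String) :=
  [("chapter_index", PySem.Int.toStr (idx + 1)), ("phase", phase), ("focus", focus)]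

-- ===== PORT A =====
-- Float test 'position <= c' (position = (idx+1)/total, c ∈ {0.3,0.7,0.2,0.55,0.85}) is
-- ported as the exact integer comparison den*(idx+1) ≤ num*total: on the domain
-- |chapter_count| ≤ 2^31 the gap of any non-tie to the threshold is ≥ 1/(20·total),
-- far above double rounding error, so the correctly-rounded float comparison agrees.
def build_outline_phase_hints (chapter_count : Int) (continuation_mode : Bool) : List (List (String × String)) :=
  let total : Int := max 1 (if chapter_count == 0 then 1 else chapter_count)
  (PySem.List.pyRange 0 total 1).foldl (fun hints idx =>
    let pf : String × String :=
      if continuation_mode then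
        if 10 * (idx + 1) ≤ 3 * total then ("起势递进", "引入新异常并绑定角色目标")
        else if 10 * (idx + 1) ≤ 7 * total then ("代价扩张", "冲突升级且代价外溢，避免主线完结")
        else ("阶段收束", "回收局部伏笔并留下更大钩子")
      else
        if 5 * (idx + 1) ≤ total then ("铺设与触发", "建立核心问题与关键人物立场")
        else if 20 * (idx + 1) ≤ 11 * total then ("压力升级", "连续决策导致局势恶化")
        else if 20 * (idx + 1) ≤ 17 * total then ("反转与逼近", "揭露误导并逼近核心真相")
        else ("收束与续钩", "兑现局部结果并留下后续驱动力")
    hints ++ [pvRow pf.1 pf.2 idx]) []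

-- ===== PORT B =====
-- 'hints = [None] * total' then 'hints[prev:upper] = [...]': the placeholder-filled
-- list is modelled with [] placeholders (every slot is overwritten before return);
-- slice assignment 'xs[a:b] = ys' with 0 ≤ a ≤ b ≤ len(xs) is exactly
-- xs.take a ++ ys ++ xs.drop b, which is how it is ported here.
def build_outline_phase_hints_alt (chapter_count : Int) (continuation_mode : Bool) : List (List (String × String)) :=
  let total : Int := max 1 chapter_count
  let bands : List (Int × String × String) :=
    if continuation_mode then
      [(6, "起势递进", "引入新异常并绑定角色目标"),
       (14, "代价扩张", "冲突升级且代价外溢，避免主线完结"),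
       (20, "阶段收束", "回收局部伏笔并留下更大钩子")]
    else
      [(4, "铺设与触发", "建立核心问题与关键人物立场"),
       (11, "压力升级", "连续决策导致局势恶化"),
       (17, "反转与逼近", "揭露误导并逼近核心真相"),
       (20, "收束与续钩", "兑现局部结果并留下后续驱动力")]
  (bands.foldl (fun (st : List (List (String × String)) × Int) b =>
      let upper := PySem.Int.floordiv (b.1 * total) 20
      (st.1.take st.2.toNat
         ++ (PySem.List.pyRange st.2 upper 1).map (fun i => pvRow b.2.1 b.2.2 i)
         ++ st.1.drop upper.toNat,
       upper))
    (List.replicate total.toNat [], 0)).1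

-- ===== PRECONDITION & SPEC =====
def Spec_build_outline_phase_hints (chapter_count : Int) (continuation_mode : Bool) (out : List (List (String × String))) : Prop := out = build_outline_phase_hints_alt chapter_count continuation_mode
instance (chapter_count : Int) (continuation_mode : Bool) (out : List (List (String × String))) : Decidable (Spec_build_outline_phase_hints chapter_count continuation_mode out) := by unfold Spec_build_outline_phase_hints; infer_instance

-- ===== CLAIM (what is proved, stated in full; the proofs are below) =====
def Claim_equal_build_outline_phase_hints : Prop := ∀ (chapter_count : Int) (continuation_mode : Bool), Dom_build_outline_phase_hints chapter_count continuation_mode → Spec_build_outline_phase_hints chapter_count continuation_mode (build_outline_phase_hints chapter_count continuation_mode)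

-- ===== LEMMAS AND PROOFS =====

-- one slice-assignment step of B: writing [p,u) into 'done ++ placeholders'
theorem pvStep (t p u : Int) (D : List (List (String × String))) (ph fo : String)
    (h0 : 0 ≤ p) (hpu : p ≤ u) (hut : u ≤ t)
    (hD : D.length = p.toNat) :
    ((D ++ List.replicate (t.toNat - p.toNat) []).take p.toNat
       ++ (PySem.List.pyRange p u 1).map (pvRow ph fo)
       ++ (D ++ List.replicate (t.toNat - p.toNat) []).drop u.toNat)
      = (D ++ (PySem.List.pyRange p u 1).map (pvRow ph fo))
          ++ List.replicate (t.toNat - u.toNat) ([] : List (String × String)) := by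
  rw [List.take_left' hD, List.drop_append, List.drop_of_length_le (by omega),
    List.drop_replicate]
  have : t.toNat - p.toNat - (u.toNat - D.length) = t.toNat - u.toNat := by omega
  rw [this, List.nil_append, List.append_assoc]

theorem pvLenSeg (p u : Int) (ph fo : String) (h0 : 0 ≤ p) (hpu : p ≤ u) :
    ((PySem.List.pyRange p u 1).map (pvRow ph fo)).length = u.toNat - p.toNat := by
  rw [List.length_map, PySem.List.length_pyRange_one]
  omega

theorem pv_main (chapter_count : Int) (continuation_mode : Bool) :
    build_outline_phase_hints chapter_count continuation_mode
      = build_outline_phase_hints_alt chapter_count continuation_mode := by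
  unfold build_outline_phase_hints build_outline_phase_hints_alt
  have htot : max 1 (if chapter_count == 0 then (1:Int) else chapter_count)
      = max 1 chapter_count := by
    by_cases h : chapter_count = 0 <;> simp [h]
  rw [htot]
  set t : Int := max 1 chapter_count with ht
  have ht1 : (1:Int) ≤ t := le_max_left _ _
  have h20 : (0:Int) < 20 := by norm_num
  have e20 : 20 * t / 20 = t := Int.mul_ediv_cancel_left t (by norm_num)
  cases continuation_mode
  · -- normal mode: four bands
    simp only [Bool.false_eq_true, if_false, List.foldl_cons, List.foldl_nil,
      PySem.Int.floordiv_eq_ediv_of_pos h20,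
      PySem.List.foldl_append_singleton_eq_map, List.nil_append]
    rw [show (List.replicate t.toNat ([] : List (String × String)))
          = [] ++ List.replicate (t.toNat - (0:Int).toNat) [] by simp]
    rw [pvStep t 0 (4*t/20) [] _ _ le_rfl (by omega) (by omega) rfl,
      pvStep t (4*t/20) (11*t/20) _ _ _ (by omega) (by omega) (by omega)
        (by rw [List.nil_append, pvLenSeg 0 (4*t/20) _ _ le_rfl (by omega)]; omega),
      pvStep t (11*t/20) (17*t/20) _ _ _ (by omega) (by omega) (by omega)
        (by rw [List.length_append, List.length_append, List.length_nil,
              pvLenSeg 0 (4*t/20) _ _ le_rfl (by omega),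
              pvLenSeg (4*t/20) (11*t/20) _ _ (by omega) (by omega)]; omega),
      pvStep t (17*t/20) (20*t/20) _ _ _ (by omega) (by omega) (by omega)
        (by rw [List.length_append, List.length_append, List.length_append, List.length_nil,
              pvLenSeg 0 (4*t/20) _ _ le_rfl (by omega),
              pvLenSeg (4*t/20) (11*t/20) _ _ (by omega) (by omega),
              pvLenSeg (11*t/20) (17*t/20) _ _ (by omega) (by omega)]; omega)]
    rw [e20, show t.toNat - t.toNat = 0 by omega]
    simp only [List.replicate_zero, List.append_nil, List.nil_append]
    rw [PySem.List.pyRange_one_append 0 (17*t/20) t (by omega) (by omega),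
      PySem.List.pyRange_one_append 0 (11*t/20) (17*t/20) (by omega) (by omega),
      PySem.List.pyRange_one_append 0 (4*t/20) (11*t/20) (by omega) (by omega)]
    simp only [List.map_append]
    congr 1
    · congr 1
      · congr 1
        · apply List.map_congr_left
          intro i hi
          rw [PySem.List.mem_pyRange_one] at hi
          obtain ⟨h1, h2⟩ := hi
          rw [if_pos (by omega)]
        · apply List.map_congr_left
          intro i hi
          rw [PySem.List.mem_pyRange_one] at hi
          obtain ⟨h1, h2⟩ := hi
          rw [if_neg (by omega), if_pos (by omega)]
      · apply List.map_congr_left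
        intro i hi
        rw [PySem.List.mem_pyRange_one] at hi
        obtain ⟨h1, h2⟩ := hi
        rw [if_neg (by omega), if_neg (by omega), if_pos (by omega)]
    · apply List.map_congr_left
      intro i hi
      rw [PySem.List.mem_pyRange_one] at hi
      obtain ⟨h1, h2⟩ := hi
      rw [if_neg (by omega), if_neg (by omega), if_neg (by omega)]
  · -- continuation mode: three bands
    simp only [if_true, List.foldl_cons, List.foldl_nil,
      PySem.Int.floordiv_eq_ediv_of_pos h20,
      PySem.List.foldl_append_singleton_eq_map, List.nil_append]
    rw [show (List.replicate t.toNat ([] : List (String × String)))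
          = [] ++ List.replicate (t.toNat - (0:Int).toNat) [] by simp]
    rw [pvStep t 0 (6*t/20) [] _ _ le_rfl (by omega) (by omega) rfl,
      pvStep t (6*t/20) (14*t/20) _ _ _ (by omega) (by omega) (by omega)
        (by rw [List.nil_append, pvLenSeg 0 (6*t/20) _ _ le_rfl (by omega)]; omega),
      pvStep t (14*t/20) (20*t/20) _ _ _ (by omega) (by omega) (by omega)
        (by rw [List.length_append, List.length_append, List.length_nil,
              pvLenSeg 0 (6*t/20) _ _ le_rfl (by omega),
              pvLenSeg (6*t/20) (14*t/20) _ _ (by omega) (by omega)]; omega)]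
    rw [e20, show t.toNat - t.toNat = 0 by omega]
    simp only [List.replicate_zero, List.append_nil, List.nil_append]
    rw [PySem.List.pyRange_one_append 0 (14*t/20) t (by omega) (by omega),
      PySem.List.pyRange_one_append 0 (6*t/20) (14*t/20) (by omega) (by omega)]
    simp only [List.map_append]
    congr 1
    · congr 1
      · apply List.map_congr_left
        intro i hi
        rw [PySem.List.mem_pyRange_one] at hi
        obtain ⟨h1, h2⟩ := hi
        rw [if_pos (by omega)]
      · apply List.map_congr_left
        intro i hi
        rw [PySem.List.mem_pyRange_one] at hi
        obtain ⟨h1, h2⟩ := hi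
        rw [if_neg (by omega), if_pos (by omega)]
    · apply List.map_congr_left
      intro i hi
      rw [PySem.List.mem_pyRange_one] at hi
      obtain ⟨h1, h2⟩ := hi
      rw [if_neg (by omega), if_neg (by omega)]

-- ===== VERDICT (by name: the statement is the Claim_ definition above) =====
theorem build_outline_phase_hints_spec : Claim_equal_build_outline_phase_hints := by
  intro cc cm _
  unfold Spec_build_outline_phase_hints
  exact pv_main cc cm
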